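-- pv_equiv track=rewrite | github.com/lovhag/dl4nlp_assignment_1 | help_functions.py | build_sense_dict
-- ===== SOURCE A (Python) =====
-- def build_sense_dict(lemmas, sense_keys):
--     sense_key_dict_per_lemma = {}
--     for index, lemma in enumerate(lemmas):
--         if lemma not in sense_key_dict_per_lemma:
--             sense_key_dict_per_lemma[lemma] = {}
--         if sense_keys[index] not in sense_key_dict_per_lemma[lemma]:
--             curr_len = len(sense_key_dict_per_lemma[lemma])
--             sense_key_dict_per_lemma[lemma][sense_keys[index]] = curr_len+1
--     return sense_key_dict_per_lemma
-- ===== SOURCE B (Python) =====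
-- def build_sense_dict(lemmas, sense_keys):
--     # pass 1: group the sense keys by lemma, in order of appearance
--     groups = {}
--     for i, lemma in enumerate(lemmas):
--         groups.setdefault(lemma, []).append(sense_keys[i])
--     # pass 2: per lemma, number the distinct sense keys 1.. in first-occurrence order
--     return {lemma: {k: j + 1 for j, k in enumerate(dict.fromkeys(keys))}
--             for lemma, keys in groups.items()}
-- ===== Notes on version B (the rewrite author's own statement) =====
-- stated objective: alternative
-- what changed: A builds the nested numbering in one interleaved pass; B first groups the sense keys by lemma in a separate pass, then numbers each group's distinct keys (dict.fromkeys + enumerate) in a second pass.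
import Mathlib
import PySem

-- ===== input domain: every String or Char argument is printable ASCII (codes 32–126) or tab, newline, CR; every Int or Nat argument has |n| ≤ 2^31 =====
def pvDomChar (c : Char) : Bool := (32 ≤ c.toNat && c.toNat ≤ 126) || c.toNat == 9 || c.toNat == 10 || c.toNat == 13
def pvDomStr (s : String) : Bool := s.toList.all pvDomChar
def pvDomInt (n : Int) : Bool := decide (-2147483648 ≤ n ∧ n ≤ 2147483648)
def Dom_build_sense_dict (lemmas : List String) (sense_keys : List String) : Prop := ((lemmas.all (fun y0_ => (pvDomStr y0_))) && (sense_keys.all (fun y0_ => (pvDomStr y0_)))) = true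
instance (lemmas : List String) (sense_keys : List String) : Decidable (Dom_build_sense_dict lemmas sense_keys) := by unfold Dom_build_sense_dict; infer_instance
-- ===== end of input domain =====

-- B builds the same nested numbering in two separate passes (group by lemma, then number the
-- distinct keys of each group) instead of A's single interleaved pass; objective: alternative.

-- ===== PORT A =====
-- A's loop body: ensure d[lemma] exists, then assign the next 1-based index to an unseen sense key.
def stepA (d : PySem.Dict String (PySem.Dict String Int)) (lem sk : String) :
    PySem.Dict String (PySem.Dict String Int) :=
  let d := if d.contains lem then d else d.insert lem PySem.Dict.empty
  let inner := d.getD lem PySem.Dict.empty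
  if inner.contains sk then d
  else d.insert lem (inner.insert sk ((inner.size : Int) + 1))

def build_sense_dict (lemmas : List String) (sense_keys : List String) :
    List (String × List (String × Int)) :=
  (((PySem.List.enumerate lemmas 0).foldl
      (fun d p => match PySem.List.pyGet? sense_keys p.1 with
                  | some sk => stepA d p.2 sk
                  | none => d)  -- unreachable under Pre_ (A raises IndexError there)
      PySem.Dict.empty).items).map (fun p => (p.1, p.2.items))

-- ===== PORT B =====
-- pass 1 body: groups.setdefault(lemma, []).append(sense_keys[i])
def stepG (g : PySem.Dict String (List String)) (lem sk : String) :
    PySem.Dict String (List String) :=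
  g.modify lem [] (· ++ [sk])

-- pass 2 inner comprehension: {k: j+1 for j, k in enumerate(dict.fromkeys(keys))}
def numbered (keys : List String) : List (String × Int) :=
  (PySem.List.enumerate (PySem.Set.ofList keys) 0).map (fun p => (p.2, p.1 + 1))

def build_sense_dict_alt (lemmas : List String) (sense_keys : List String) :
    List (String × List (String × Int)) :=
  (((PySem.List.enumerate lemmas 0).foldl
      (fun g p => match PySem.List.pyGet? sense_keys p.1 with
                  | some sk => stepG g p.2 sk
                  | none => g)  -- unreachable under Pre_ (B raises IndexError there)
      PySem.Dict.empty).items).map (fun p => (p.1, numbered p.2))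

-- ===== PRECONDITION & SPEC =====
-- Both A and B raise IndexError (sense_keys[index]) when sense_keys is shorter than lemmas;
-- exactly those inputs are excluded.
def Pre_build_sense_dict (lemmas : List String) (sense_keys : List String) : Prop :=
  lemmas.length ≤ sense_keys.length
instance (lemmas : List String) (sense_keys : List String) : Decidable (Pre_build_sense_dict lemmas sense_keys) := by unfold Pre_build_sense_dict; infer_instance

def pvWitness_build_sense_dict : List String × List String :=
  (["run", "run", "walk", "run"], ["run%1", "run%2", "walk%1", "run%1"])

def Spec_build_sense_dict (lemmas : List String) (sense_keys : List String) (out : List (String × List (String × Int))) : Prop := out = build_sense_dict_alt lemmas sense_keys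
instance (lemmas : List String) (sense_keys : List String) (out : List (String × List (String × Int))) : Decidable (Spec_build_sense_dict lemmas sense_keys out) := by unfold Spec_build_sense_dict; infer_instance

-- ===== CLAIM (what is proved, stated in full; the proofs are below) =====
def Claim_equal_build_sense_dict : Prop := ∀ (lemmas : List String) (sense_keys : List String), Dom_build_sense_dict lemmas sense_keys → Pre_build_sense_dict lemmas sense_keys → Spec_build_sense_dict lemmas sense_keys (build_sense_dict lemmas sense_keys)

-- ===== LEMMAS AND PROOFS =====

-- A's inner-dict builder, in isolation.
def innerStep (inner : PySem.Dict String Int) (sk : String) : PySem.Dict String Int :=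
  if inner.contains sk then inner else inner.insert sk ((inner.size : Int) + 1)

def buildInner (ks : List String) : PySem.Dict String Int :=
  ks.foldl innerStep PySem.Dict.empty

-- A's whole state as a function of B's grouping state.
def mapD (g : PySem.Dict String (List String)) : PySem.Dict String (PySem.Dict String Int) :=
  PySem.Dict.mk (g.items.map (fun p => (p.1, buildInner p.2)))

theorem keys_mapD (g : PySem.Dict String (List String)) : (mapD g).keys = g.keys := by
  simp [mapD, PySem.Dict.keys]

theorem contains_mapD (g : PySem.Dict String (List String)) (l : String) :
    (mapD g).contains l = g.contains l := by
  rw [PySem.Dict.contains_eq_decide_mem_keys, PySem.Dict.contains_eq_decide_mem_keys, keys_mapD]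

theorem nodup_keys_mapD (g : PySem.Dict String (List String)) (h : g.keys.Nodup) :
    (mapD g).keys.Nodup := by rw [keys_mapD]; exact h

theorem getD_mapD (g : PySem.Dict String (List String)) (l : String) (h : g.keys.Nodup) :
    (mapD g).getD l PySem.Dict.empty = buildInner (g.getD l []) := by
  by_cases hc : g.contains l = true
  · have hsome : (g.get? l).isSome := by rw [← PySem.Dict.contains_eq_isSome_get?]; exact hc
    obtain ⟨v, hv⟩ := Option.isSome_iff_exists.mp hsome
    have hmem : (l, v) ∈ g.items := PySem.Dict.mem_items_of_get?_eq_some g hv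
    have hmem' : (l, buildInner v) ∈ (mapD g).items := by
      simp only [mapD]
      exact List.mem_map.mpr ⟨(l, v), hmem, rfl⟩
    rw [PySem.Dict.getD_of_mem_items _ hmem' (nodup_keys_mapD g h),
        PySem.Dict.getD_of_get?_eq_some g _ hv]
  · have hc1 : (mapD g).contains l = false := by rw [contains_mapD]; simpa using hc
    have hc2 : g.contains l = false := by simpa using hc
    rw [PySem.Dict.getD_of_not_contains _ _ hc1, PySem.Dict.getD_of_not_contains _ _ hc2]
    rfl

theorem insert_mapD (g : PySem.Dict String (List String)) (l : String) (ks : List String) :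
    (mapD g).insert l (buildInner ks) = mapD (g.insert l ks) := by
  apply PySem.Dict.ext
  by_cases hc : g.contains l = true
  · have hc1 : (mapD g).contains l = true := by rw [contains_mapD]; exact hc
    rw [PySem.Dict.items_insert_of_contains _ _ hc1]
    simp only [mapD, PySem.Dict.items_insert_of_contains _ _ hc, List.map_map]
    apply List.map_congr_left
    intro p _
    by_cases hpl : p.1 = l <;> simp [hpl]
  · have hc1 : (mapD g).contains l = false := by rw [contains_mapD]; simpa using hc
    have hc2 : g.contains l = false := by simpa using hc
    rw [PySem.Dict.items_insert_of_not_contains _ _ hc1]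
    simp [mapD, PySem.Dict.items_insert_of_not_contains _ _ hc2]

theorem insert_self_of_getD (d : PySem.Dict String (PySem.Dict String Int)) (l : String)
    (h : d.keys.Nodup) (hc : d.contains l = true) :
    d.insert l (d.getD l PySem.Dict.empty) = d := by
  have hsome : (d.get? l).isSome := by rw [← PySem.Dict.contains_eq_isSome_get?]; exact hc
  obtain ⟨v, hv⟩ := Option.isSome_iff_exists.mp hsome
  apply PySem.Dict.ext
  rw [PySem.Dict.items_insert_of_contains _ _ hc]
  have hg : d.getD l PySem.Dict.empty = v := PySem.Dict.getD_of_get?_eq_some d _ hv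
  conv_rhs => rw [← List.map_id d.items]
  apply List.map_congr_left
  intro p hp
  by_cases hpl : p.1 == l
  · have : d.get? p.1 = some p.2 := PySem.Dict.get?_of_mem_items d hp h
    rw [eq_of_beq hpl, hv] at this
    have : p = (l, v) := by
      obtain ⟨a, b⟩ := p
      simp at hpl this
      exact Prod.ext hpl this.symm
    simp [this, hg]
  · simp [hpl]

-- one loop step: A's update of the mapped state is the map of B's grouping update
theorem step_mapD (g : PySem.Dict String (List String)) (l sk : String) (h : g.keys.Nodup) :
    stepA (mapD g) l sk = mapD (stepG g l sk) := by
  have hmod : stepG g l sk = g.insert l (g.getD l [] ++ [sk]) := rfl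
  by_cases hc : g.contains l = true
  · have hA : stepA (mapD g) l sk =
        (if (buildInner (g.getD l [])).contains sk then mapD g
         else (mapD g).insert l ((buildInner (g.getD l [])).insert sk
                ((buildInner (g.getD l [])).size + 1))) := by
      simp only [stepA, contains_mapD, hc, if_true, getD_mapD g l h]
    have hbi : buildInner (g.getD l [] ++ [sk]) = innerStep (buildInner (g.getD l [])) sk := by
      simp [buildInner, List.foldl_append]
    by_cases hsk : (buildInner (g.getD l [])).contains sk = true
    · rw [hA, if_pos hsk, hmod, ← insert_mapD]
      rw [hbi, innerStep, if_pos hsk]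
      rw [← getD_mapD g l h]
      exact (insert_self_of_getD _ _ (nodup_keys_mapD g h) (by rw [contains_mapD]; exact hc)).symm
    · rw [hA, if_neg (by simpa using hsk), hmod, ← insert_mapD, hbi, innerStep,
          if_neg (by simpa using hsk)]
  · have hg0 : g.getD l [] = [] := PySem.Dict.getD_of_not_contains g [] (by simpa using hc)
    have hA : stepA (mapD g) l sk =
        ((mapD g).insert l PySem.Dict.empty).insert l
          ((PySem.Dict.empty : PySem.Dict String Int).insert sk
            (((PySem.Dict.empty : PySem.Dict String Int).size : Int) + 1)) := by
      simp [stepA, contains_mapD, hc, PySem.Dict.getD_insert_self, PySem.Dict.contains_empty]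
    rw [hA, PySem.Dict.insert_insert_self, hmod, ← insert_mapD, hg0]
    rfl

theorem nodup_keys_stepG (g : PySem.Dict String (List String)) (l sk : String)
    (h : g.keys.Nodup) : (stepG g l sk).keys.Nodup := by
  exact PySem.Dict.nodup_keys_insert g _ _ h

-- the whole loop, over the zipped pairs
theorem fold_mapD (pairs : List (String × String)) :
    ∀ (g : PySem.Dict String (List String)), g.keys.Nodup →
    pairs.foldl (fun d p => stepA d p.1 p.2) (mapD g)
      = mapD (pairs.foldl (fun g p => stepG g p.1 p.2) g) := by
  induction pairs with
  | nil => intro g _; rfl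
  | cons p ps ih =>
    intro g h
    simp only [List.foldl_cons, step_mapD g p.1 p.2 h]
    exact ih _ (nodup_keys_stepG g p.1 p.2 h)

-- under Pre_, both ports' "enumerate + sense_keys[i]" loops are folds over the zipped lists
theorem foldl_enum_get {δ : Type} (f : δ → String → String → δ) :
    ∀ (ls pre rest : List String) (d : δ), ls.length ≤ rest.length →
    (PySem.List.enumerate ls ((pre.length : Int))).foldl
        (fun d p => match PySem.List.pyGet? (pre ++ rest) p.1 with
                    | some sk => f d p.2 sk
                    | none => d) d
      = (ls.zip rest).foldl (fun d p => f d p.1 p.2) d := by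
  intro ls
  induction ls with
  | nil => intro pre rest d _; rfl
  | cons l ls ih =>
    intro pre rest d hlen
    cases rest with
    | nil => simp at hlen
    | cons r rs =>
      rw [PySem.List.enumerate_cons, List.foldl_cons, List.zip_cons_cons, List.foldl_cons]
      rw [PySem.List.pyGet?_append_length]
      have hcast : ((pre.length : Int)) + 1 = (((pre ++ [r]).length : Int)) := by
        simp
      have happ : pre ++ r :: rs = (pre ++ [r]) ++ rs := by simp
      rw [hcast, happ, ih (pre ++ [r]) rs (f d l r) (by simpa using hlen)]

-- (buildInner ks).items is exactly B's numbering of the distinct keys of ks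
theorem enumerate_append_singleton {α : Type} (xs : List α) (x : α) :
    ∀ (s : Int), PySem.List.enumerate (xs ++ [x]) s
      = PySem.List.enumerate xs s ++ [((s + xs.length : Int), x)] := by
  induction xs with
  | nil => intro s; simp [PySem.List.enumerate_cons, PySem.List.enumerate_nil]
  | cons y ys ih =>
    intro s
    rw [List.cons_append, PySem.List.enumerate_cons, PySem.List.enumerate_cons, ih (s + 1)]
    simp only [List.cons_append, List.length_cons]
    congr 3
    push_cast
    ring_nf

theorem keys_buildInner (ks : List String) : (buildInner ks).keys = PySem.Set.ofList ks := by
  induction ks using List.reverseRecOn with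
  | nil => rfl
  | append_singleton ks x ih =>
    rw [buildInner, List.foldl_append, List.foldl_cons, List.foldl_nil, ← buildInner,
        PySem.Set.ofList_append_singleton, ← ih, innerStep]
    by_cases hc : (buildInner ks).contains x = true
    · rw [if_pos hc, PySem.Set.add_of_mem]
      exact (PySem.Dict.contains_iff_mem_keys _ _).mp hc
    · have hc2 : (buildInner ks).contains x = false := by simpa using hc
      rw [if_neg (by simpa using hc), PySem.Dict.keys_insert_of_not_contains _ _ hc2,
          PySem.Set.add_of_not_mem]
      intro hmem
      exact absurd ((PySem.Dict.contains_iff_mem_keys _ _).mpr hmem) (by simpa using hc)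

theorem items_buildInner (ks : List String) : (buildInner ks).items = numbered ks := by
  induction ks using List.reverseRecOn with
  | nil => rfl
  | append_singleton ks x ih =>
    rw [buildInner, List.foldl_append, List.foldl_cons, List.foldl_nil, ← buildInner, innerStep]
    have hsize : (buildInner ks).size = (PySem.Set.ofList ks).length := by
      have h1 : (buildInner ks).keys.length = (PySem.Set.ofList ks).length := by
        rw [keys_buildInner]
      simpa [PySem.Dict.keys, PySem.Dict.size] using h1
    by_cases hc : (buildInner ks).contains x = true
    · rw [if_pos hc, ih]
      have hx : x ∈ PySem.Set.ofList ks := by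
        rw [← keys_buildInner]; exact (PySem.Dict.contains_iff_mem_keys _ _).mp hc
      simp [numbered, PySem.Set.ofList_append_singleton, PySem.Set.add_of_mem hx]
    · have hc2 : (buildInner ks).contains x = false := by simpa using hc
      rw [if_neg (by simpa using hc), PySem.Dict.items_insert_of_not_contains _ _ hc2, ih]
      have hx : x ∉ PySem.Set.ofList ks := by
        rw [← keys_buildInner]
        intro hmem
        exact absurd ((PySem.Dict.contains_iff_mem_keys _ _).mpr hmem) (by simpa using hc)
      rw [numbered, numbered, PySem.Set.ofList_append_singleton, PySem.Set.add_of_not_mem hx,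
          enumerate_append_singleton _ _ 0]
      simp [hsize]

-- ===== VERDICT (by name: the statement is the Claim_ definition above) =====
theorem build_sense_dict_spec : Claim_equal_build_sense_dict := by
  intro lemmas sense_keys _ hpre
  unfold Spec_build_sense_dict build_sense_dict build_sense_dict_alt
  have hA := foldl_enum_get (fun d l sk => stepA d l sk) lemmas [] sense_keys
      PySem.Dict.empty hpre
  have hB := foldl_enum_get (fun g l sk => stepG g l sk) lemmas [] sense_keys
      PySem.Dict.empty hpre
  simp only [List.nil_append, List.length_nil, Nat.cast_zero] at hA hB
  rw [hA, hB]
  have hmap : (mapD PySem.Dict.empty) = PySem.Dict.empty := rfl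
  rw [← hmap, fold_mapD _ PySem.Dict.empty PySem.Dict.nodup_keys_empty]
  simp only [mapD, List.map_map]
  apply List.map_congr_left
  intro p _
  simp [items_buildInner]
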